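-- pv_equiv track=rewrite | github.com/Tomastoons/real_brands | app/extract_candidates.py | collapse_component_brands
-- ===== SOURCE A (Python) =====
-- def collapse_component_brands(brands: list[str]) -> list[str]:
--     """Remove single-token brands that are components of accepted multi-word brands."""
--     multiword_brands = [brand for brand in brands if " " in brand]
--     if not multiword_brands:
--         return brands
--
--     drop_candidates: set[str] = set()
--     for multiword in multiword_brands:
--         multiword_tokens = multiword.split()
--         for token in multiword.split():
--             if token in brands and " " not in token:
--                 drop_candidates.add(token)
--
--         # Drop shorter contiguous multiword fragments of longer accepted brands.
--         for other in multiword_brands: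
--             if other == multiword:
--                 continue
--             other_tokens = other.split()
--             if len(other_tokens) >= len(multiword_tokens):
--                 continue
--             for idx in range(0, len(multiword_tokens) - len(other_tokens) + 1):
--                 if multiword_tokens[idx: idx + len(other_tokens)] == other_tokens:
--                     drop_candidates.add(other)
--                     break
--
--     return [brand for brand in brands if brand not in drop_candidates]
-- ===== SOURCE B (Python) =====
-- def collapse_component_brands(brands: list[str]) -> list[str]:
--     """Remove single-token brands that are components of accepted multi-word brands."""
--     multi = [(b, b.split()) for b in brands if " " in b]
--     if not multi:
--         return brands
--
--     component_tokens: set[str] = set()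
--     fragments: set[tuple[str, ...]] = set()
--     for _, tokens in multi:
--         component_tokens.update(tokens)
--         n = len(tokens)
--         for ln in range(0, n):
--             for i in range(0, n - ln + 1):
--                 fragments.add(tuple(tokens[i:i + ln]))
--
--     return [
--         b for b in brands
--         if b not in component_tokens
--         and not (" " in b and tuple(b.split()) in fragments)
--     ]
-- ===== Notes on version B (the rewrite author's own statement) =====
-- stated objective: alternative
-- what changed: B builds a token set and a set of all strict contiguous token-fragments of the multiword brands in one sweep, then filters the brand list in a single pass, instead of A's nested loops that re-scan every multiword brand (and re-split it) against every other multiword brand with an inner positional scan.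
import Mathlib
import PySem

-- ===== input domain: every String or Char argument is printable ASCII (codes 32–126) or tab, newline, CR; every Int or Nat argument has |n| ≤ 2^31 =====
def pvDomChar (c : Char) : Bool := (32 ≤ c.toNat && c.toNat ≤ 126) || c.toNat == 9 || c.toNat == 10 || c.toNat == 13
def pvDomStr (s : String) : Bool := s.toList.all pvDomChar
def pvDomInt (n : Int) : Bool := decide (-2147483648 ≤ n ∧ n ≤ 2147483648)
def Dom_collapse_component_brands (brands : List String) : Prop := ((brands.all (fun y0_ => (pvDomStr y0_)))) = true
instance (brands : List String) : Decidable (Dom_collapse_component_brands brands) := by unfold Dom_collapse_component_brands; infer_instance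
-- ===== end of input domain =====

-- B builds token/fragment index sets in one sweep over the multiword brands and filters in a single pass,
-- instead of A's repeated pairwise scanning of multiword brands; objective: alternative decomposition.

-- ===== PORT A =====
-- inner 'for idx in range(...): if slice == other_tokens: add; break'
def pvDropScan (dc : PySem.Set String) (mts : List String) (other : String)
    (ots : List String) : List Int → PySem.Set String
  | [] => dc
  | idx :: rest =>
    if PySem.List.slice mts (some idx) (some (idx + (ots.length : Int))) = ots
    then PySem.Set.add dc other
    else pvDropScan dc mts other ots rest

def collapse_component_brands (brands : List String) : List String :=
  let multiword_brands := brands.filter (fun brand => PySem.Str.isIn " " brand)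
  if multiword_brands.isEmpty then brands else
  let drop_candidates : PySem.Set String :=
    multiword_brands.foldl (fun dc multiword =>
      let multiword_tokens := PySem.Str.split₀ multiword
      let dc := (PySem.Str.split₀ multiword).foldl (fun dc token =>
        if brands.contains token && !(PySem.Str.isIn " " token)
        then PySem.Set.add dc token else dc) dc
      multiword_brands.foldl (fun dc other =>
        if other = multiword then dc else
        let other_tokens := PySem.Str.split₀ other
        if multiword_tokens.length ≤ other_tokens.length then dc else
        pvDropScan dc multiword_tokens other other_tokens
          (PySem.List.pyRange 0 ((multiword_tokens.length : Int) - (other_tokens.length : Int) + 1) 1))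
        dc)
      PySem.Set.empty
  brands.filter (fun brand => !(PySem.Set.contains drop_candidates brand))

-- ===== PORT B =====
def collapse_component_brands_alt (brands : List String) : List String :=
  let multi := (brands.filter (fun b => PySem.Str.isIn " " b)).map (fun b => (b, PySem.Str.split₀ b))
  if multi.isEmpty then brands else
  let component_tokens : PySem.Set String :=
    multi.foldl (fun s p => PySem.Set.update s p.2) PySem.Set.empty
  let fragments : PySem.Set (List String) :=
    multi.foldl (fun s p =>
      let n := p.2.length
      (PySem.List.pyRange 0 (n : Int) 1).foldl (fun s ln =>
        (PySem.List.pyRange 0 ((n : Int) - ln + 1) 1).foldl (fun s i =>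
          PySem.Set.add s (PySem.List.slice p.2 (some i) (some (i + ln)))) s) s)
      PySem.Set.empty
  brands.filter (fun b =>
    !(PySem.Set.contains component_tokens b) &&
    !(PySem.Str.isIn " " b && PySem.Set.contains fragments (PySem.Str.split₀ b)))

-- ===== PRECONDITION & SPEC =====
def Spec_collapse_component_brands (brands : List String) (out : List String) : Prop := out = collapse_component_brands_alt brands
instance (brands : List String) (out : List String) : Decidable (Spec_collapse_component_brands brands out) := by unfold Spec_collapse_component_brands; infer_instance

-- ===== CLAIM (what is proved, stated in full; the proofs are below) =====
def Claim_equal_collapse_component_brands : Prop := ∀ (brands : List String), Dom_collapse_component_brands brands → Spec_collapse_component_brands brands (collapse_component_brands brands)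

-- ===== LEMMAS AND PROOFS =====

-- proof-only names for the ports' intermediate values (defeq copies of the ports' folds)
def pvM (brands : List String) : List String := brands.filter (fun b => PySem.Str.isIn " " b)

def pvDropA (brands : List String) : PySem.Set String :=
  (pvM brands).foldl (fun dc multiword =>
    (pvM brands).foldl (fun dc other =>
      if other = multiword then dc else
      if (PySem.Str.split₀ multiword).length ≤ (PySem.Str.split₀ other).length then dc else
      pvDropScan dc (PySem.Str.split₀ multiword) other (PySem.Str.split₀ other)
        (PySem.List.pyRange 0 (((PySem.Str.split₀ multiword).length : Int) - ((PySem.Str.split₀ other).length : Int) + 1) 1))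
      ((PySem.Str.split₀ multiword).foldl (fun dc token =>
        if brands.contains token && !(PySem.Str.isIn " " token)
        then PySem.Set.add dc token else dc) dc))
    PySem.Set.empty

def pvMulti (brands : List String) : List (String × List String) :=
  (pvM brands).map (fun b => (b, PySem.Str.split₀ b))

def pvCompT (brands : List String) : PySem.Set String :=
  (pvMulti brands).foldl (fun s p => PySem.Set.update s p.2) PySem.Set.empty

def pvFrags (brands : List String) : PySem.Set (List String) :=
  (pvMulti brands).foldl (fun s p =>
    (PySem.List.pyRange 0 (p.2.length : Int) 1).foldl (fun s ln =>
      (PySem.List.pyRange 0 ((p.2.length : Int) - ln + 1) 1).foldl (fun s i =>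
        PySem.Set.add s (PySem.List.slice p.2 (some i) (some (i + ln)))) s) s)
    PySem.Set.empty

theorem pv_portA_eq (brands : List String) :
    collapse_component_brands brands =
      if (pvM brands).isEmpty then brands
      else brands.filter (fun b => !(PySem.Set.contains (pvDropA brands) b)) := rfl

theorem pv_portB_eq (brands : List String) :
    collapse_component_brands_alt brands =
      if (pvMulti brands).isEmpty then brands
      else brands.filter (fun b =>
        !(PySem.Set.contains (pvCompT brands) b) &&
        !(PySem.Str.isIn " " b && PySem.Set.contains (pvFrags brands) (PySem.Str.split₀ b))) := rfl

-- a contiguous fragment of ts equal to os, in plain Nat terms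
def pvFragAt (ts os : List String) : Prop :=
  ∃ j : Nat, j + os.length ≤ ts.length ∧ (ts.drop j).take os.length = os

-- ===== membership characterizations, bottom-up =====

theorem pv_mem_tokLoop (brands : List String) (toks : List String) :
    ∀ (dc : PySem.Set String) (y : String),
      y ∈ toks.foldl (fun dc token =>
        if brands.contains token && !(PySem.Str.isIn " " token)
        then PySem.Set.add dc token else dc) dc ↔
      y ∈ dc ∨ (y ∈ toks ∧ (brands.contains y && !(PySem.Str.isIn " " y)) = true) := by
  induction toks with
  | nil => intro dc y; simp
  | cons t toks ih =>
    intro dc y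
    simp only [List.foldl_cons]
    by_cases hc : (brands.contains t && !(PySem.Str.isIn " " t)) = true
    · rw [if_pos hc, ih, PySem.Set.mem_add]
      constructor
      · rintro ((h | rfl) | ⟨hm, hcy⟩)
        · exact Or.inl h
        · exact Or.inr ⟨List.mem_cons_self, hc⟩
        · exact Or.inr ⟨List.mem_cons_of_mem _ hm, hcy⟩
      · rintro (h | ⟨hm, hcy⟩)
        · exact Or.inl (Or.inl h)
        · rcases List.mem_cons.mp hm with rfl | hm'
          · exact Or.inl (Or.inr rfl)
          · exact Or.inr ⟨hm', hcy⟩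
    · rw [if_neg hc, ih]
      constructor
      · rintro (h | ⟨hm, hcy⟩)
        · exact Or.inl h
        · exact Or.inr ⟨List.mem_cons_of_mem _ hm, hcy⟩
      · rintro (h | ⟨hm, hcy⟩)
        · exact Or.inl h
        · rcases List.mem_cons.mp hm with rfl | hm'
          · exact absurd hcy hc
          · exact Or.inr ⟨hm', hcy⟩

theorem pv_mem_dropScan (dc : PySem.Set String) (mts : List String) (other : String)
    (ots : List String) (idxs : List Int) (y : String) :
    y ∈ pvDropScan dc mts other ots idxs ↔
      y ∈ dc ∨ (y = other ∧ ∃ idx ∈ idxs,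
        PySem.List.slice mts (some idx) (some (idx + (ots.length : Int))) = ots) := by
  induction idxs with
  | nil => simp [pvDropScan]
  | cons idx rest ih =>
    simp only [pvDropScan]
    split
    · next hm =>
      rw [PySem.Set.mem_add]
      constructor
      · rintro (h | rfl)
        · exact Or.inl h
        · exact Or.inr ⟨rfl, idx, List.mem_cons_self, hm⟩
      · rintro (h | ⟨rfl, _⟩)
        · exact Or.inl h
        · exact Or.inr rfl
    · next hm =>
      rw [ih]
      constructor
      · rintro (h | ⟨rfl, idx', hmem, hsl⟩)
        · exact Or.inl h
        · exact Or.inr ⟨rfl, idx', List.mem_cons_of_mem _ hmem, hsl⟩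
      · rintro (h | ⟨rfl, idx', hmem, hsl⟩)
        · exact Or.inl h
        · rcases List.mem_cons.mp hmem with rfl | hmem'
          · exact absurd hsl hm
          · exact Or.inr ⟨rfl, idx', hmem', hsl⟩

theorem pv_range_slice_iff (ts os : List String) :
    (∃ idx ∈ PySem.List.pyRange 0 ((ts.length : Int) - (os.length : Int) + 1) 1,
       PySem.List.slice ts (some idx) (some (idx + (os.length : Int))) = os)
    ↔ pvFragAt ts os := by
  constructor
  · rintro ⟨idx, hmem, hsl⟩
    rw [PySem.List.mem_pyRange_one] at hmem
    refine ⟨idx.toNat, by omega, ?_⟩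
    have hidx : idx = ((idx.toNat : Nat) : Int) := by omega
    rw [hidx, PySem.List.slice_natCast_add] at hsl
    exact hsl
  · rintro ⟨j, hle, hsl⟩
    refine ⟨(j : Int), ?_, ?_⟩
    · rw [PySem.List.mem_pyRange_one]; omega
    · rw [PySem.List.slice_natCast_add]; exact hsl

theorem pv_mem_otherLoop (mw : String) (others : List String) :
    ∀ (dc : PySem.Set String) (y : String),
      y ∈ others.foldl (fun dc other =>
        if other = mw then dc else
        if (PySem.Str.split₀ mw).length ≤ (PySem.Str.split₀ other).length then dc else
        pvDropScan dc (PySem.Str.split₀ mw) other (PySem.Str.split₀ other)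
          (PySem.List.pyRange 0 (((PySem.Str.split₀ mw).length : Int) - ((PySem.Str.split₀ other).length : Int) + 1) 1)) dc ↔
      y ∈ dc ∨ (y ∈ others ∧ y ≠ mw ∧ (PySem.Str.split₀ y).length < (PySem.Str.split₀ mw).length ∧
        pvFragAt (PySem.Str.split₀ mw) (PySem.Str.split₀ y)) := by
  induction others with
  | nil => intro dc y; simp
  | cons o others ih =>
    intro dc y
    simp only [List.foldl_cons]
    by_cases heq : o = mw
    · rw [if_pos heq, ih]
      constructor
      · rintro (h | ⟨hm, h2⟩)
        · exact Or.inl h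
        · exact Or.inr ⟨List.mem_cons_of_mem _ hm, h2⟩
      · rintro (h | ⟨hm, hne, h3⟩)
        · exact Or.inl h
        · rcases List.mem_cons.mp hm with rfl | hm'
          · exact absurd heq hne
          · exact Or.inr ⟨hm', hne, h3⟩
    · rw [if_neg heq]
      by_cases hlen : (PySem.Str.split₀ mw).length ≤ (PySem.Str.split₀ o).length
      · rw [if_pos hlen, ih]
        constructor
        · rintro (h | ⟨hm, h2⟩)
          · exact Or.inl h
          · exact Or.inr ⟨List.mem_cons_of_mem _ hm, h2⟩
        · rintro (h | ⟨hm, hne, hlt, h4⟩)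
          · exact Or.inl h
          · rcases List.mem_cons.mp hm with rfl | hm'
            · omega
            · exact Or.inr ⟨hm', hne, hlt, h4⟩
      · rw [if_neg hlen, ih, pv_mem_dropScan]
        constructor
        · rintro ((h | ⟨rfl, hex⟩) | ⟨hm, h2⟩)
          · exact Or.inl h
          · exact Or.inr ⟨List.mem_cons_self, heq,
              by omega, (pv_range_slice_iff _ _).mp hex⟩
          · exact Or.inr ⟨List.mem_cons_of_mem _ hm, h2⟩
        · rintro (h | ⟨hm, hne, hlt, h4⟩)
          · exact Or.inl (Or.inl h)
          · rcases List.mem_cons.mp hm with rfl | hm'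
            · exact Or.inl (Or.inr ⟨rfl, (pv_range_slice_iff _ _).mpr h4⟩)
            · exact Or.inr ⟨hm', hne, hlt, h4⟩

theorem pv_mem_dropA (brands : List String) (y : String) :
    y ∈ pvDropA brands ↔
      (∃ mw ∈ pvM brands, y ∈ PySem.Str.split₀ mw ∧
         (brands.contains y && !(PySem.Str.isIn " " y)) = true) ∨
      (y ∈ pvM brands ∧ ∃ mw ∈ pvM brands, y ≠ mw ∧
         (PySem.Str.split₀ y).length < (PySem.Str.split₀ mw).length ∧
         pvFragAt (PySem.Str.split₀ mw) (PySem.Str.split₀ y)) := by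
  unfold pvDropA
  have main : ∀ (l : List String), l ⊆ pvM brands → ∀ (dc : PySem.Set String),
      y ∈ l.foldl (fun dc multiword =>
        (pvM brands).foldl (fun dc other =>
          if other = multiword then dc else
          if (PySem.Str.split₀ multiword).length ≤ (PySem.Str.split₀ other).length then dc else
          pvDropScan dc (PySem.Str.split₀ multiword) other (PySem.Str.split₀ other)
            (PySem.List.pyRange 0 (((PySem.Str.split₀ multiword).length : Int) - ((PySem.Str.split₀ other).length : Int) + 1) 1))
          ((PySem.Str.split₀ multiword).foldl (fun dc token =>
            if brands.contains token && !(PySem.Str.isIn " " token)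
            then PySem.Set.add dc token else dc) dc)) dc ↔
      y ∈ dc ∨ (∃ mw ∈ l, y ∈ PySem.Str.split₀ mw ∧
          (brands.contains y && !(PySem.Str.isIn " " y)) = true) ∨
        (y ∈ pvM brands ∧ ∃ mw ∈ l, y ≠ mw ∧
          (PySem.Str.split₀ y).length < (PySem.Str.split₀ mw).length ∧
          pvFragAt (PySem.Str.split₀ mw) (PySem.Str.split₀ y)) := by
    intro l
    induction l with
    | nil => intro _ dc; simp
    | cons mw l ih =>
      intro hsub dc
      simp only [List.foldl_cons]
      rw [ih (fun a ha => hsub (List.mem_cons_of_mem _ ha)),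
        pv_mem_otherLoop, pv_mem_tokLoop]
      constructor
      · rintro ((((h | ⟨hty, hcy⟩) | ⟨hyM, hne, hlt, hfr⟩)) | (⟨mw', hmw', h2⟩ | ⟨hyM, mw', hmw', h3⟩))
        · exact Or.inl h
        · exact Or.inr (Or.inl ⟨mw, List.mem_cons_self, hty, hcy⟩)
        · exact Or.inr (Or.inr ⟨hyM, mw, List.mem_cons_self, hne, hlt, hfr⟩)
        · exact Or.inr (Or.inl ⟨mw', List.mem_cons_of_mem _ hmw', h2⟩)
        · exact Or.inr (Or.inr ⟨hyM, mw', List.mem_cons_of_mem _ hmw', h3⟩)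
      · rintro (h | (⟨mw', hmw', h2⟩ | ⟨hyM, mw', hmw', h3⟩))
        · exact Or.inl (Or.inl (Or.inl h))
        · rcases List.mem_cons.mp hmw' with rfl | hm'
          · exact Or.inl (Or.inl (Or.inr h2))
          · exact Or.inr (Or.inl ⟨mw', hm', h2⟩)
        · rcases List.mem_cons.mp hmw' with rfl | hm'
          · exact Or.inl (Or.inr ⟨hyM, h3⟩)
          · exact Or.inr (Or.inr ⟨hyM, mw', hm', h3⟩)
  rw [main (pvM brands) (fun a ha => ha) PySem.Set.empty]
  simp [PySem.Set.empty]

theorem pv_mem_compT (brands : List String) (y : String) :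
    y ∈ pvCompT brands ↔ ∃ mw ∈ pvM brands, y ∈ PySem.Str.split₀ mw := by
  unfold pvCompT
  have main : ∀ (l : List (String × List String)) (s : PySem.Set String),
      y ∈ l.foldl (fun s p => PySem.Set.update s p.2) s ↔ y ∈ s ∨ ∃ p ∈ l, y ∈ p.2 := by
    intro l
    induction l with
    | nil => intro s; simp
    | cons p l ih =>
      intro s
      simp only [List.foldl_cons]
      rw [ih, PySem.Set.mem_update]
      constructor
      · rintro ((h | h) | ⟨q, hq, hy⟩)
        · exact Or.inl h
        · exact Or.inr ⟨p, List.mem_cons_self, h⟩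
        · exact Or.inr ⟨q, List.mem_cons_of_mem _ hq, hy⟩
      · rintro (h | ⟨q, hq, hy⟩)
        · exact Or.inl (Or.inl h)
        · rcases List.mem_cons.mp hq with rfl | hq'
          · exact Or.inl (Or.inr hy)
          · exact Or.inr ⟨q, hq', hy⟩
  rw [main]
  unfold pvMulti
  simp [PySem.Set.empty]

theorem pv_frag_ranges_iff (ts os : List String) :
    (∃ ln ∈ PySem.List.pyRange 0 ((ts.length : Int)) 1,
       ∃ i ∈ PySem.List.pyRange 0 ((ts.length : Int) - ln + 1) 1,
         os = PySem.List.slice ts (some i) (some (i + ln)))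
    ↔ os.length < ts.length ∧ pvFragAt ts os := by
  constructor
  · rintro ⟨ln, hln, i, hi, hsl⟩
    rw [PySem.List.mem_pyRange_one] at hln hi
    have hln' : ln = ((ln.toNat : Nat) : Int) := by omega
    have hi' : i = ((i.toNat : Nat) : Int) := by omega
    rw [hln', hi', PySem.List.slice_natCast_add] at hsl
    have hjl : i.toNat + ln.toNat ≤ ts.length := by omega
    have hlen : os.length = ln.toNat := by
      rw [hsl]
      simp [List.length_take, List.length_drop]
      omega
    refine ⟨by omega, i.toNat, by omega, ?_⟩
    rw [← hlen] at hsl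
    exact hsl.symm
  · rintro ⟨hlt, j, hle, hsl⟩
    refine ⟨(os.length : Int), ?_, (j : Int), ?_, ?_⟩
    · rw [PySem.List.mem_pyRange_one]; omega
    · rw [PySem.List.mem_pyRange_one]; omega
    · rw [PySem.List.slice_natCast_add]; exact hsl.symm

theorem pv_mem_frags (brands : List String) (os : List String) :
    os ∈ pvFrags brands ↔
      ∃ mw ∈ pvM brands, os.length < (PySem.Str.split₀ mw).length ∧
        pvFragAt (PySem.Str.split₀ mw) os := by
  unfold pvFrags
  have inner : ∀ (ts : List String) (rng : List Int) (s : PySem.Set (List String)),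
      os ∈ rng.foldl (fun s ln =>
        (PySem.List.pyRange 0 ((ts.length : Int) - ln + 1) 1).foldl (fun s i =>
          PySem.Set.add s (PySem.List.slice ts (some i) (some (i + ln)))) s) s ↔
      os ∈ s ∨ ∃ ln ∈ rng, ∃ i ∈ PySem.List.pyRange 0 ((ts.length : Int) - ln + 1) 1,
        os = PySem.List.slice ts (some i) (some (i + ln)) := by
    intro ts rng
    induction rng with
    | nil => intro s; simp
    | cons ln rng ih =>
      intro s
      simp only [List.foldl_cons]
      rw [ih, PySem.Set.mem_foldl_add]
      constructor
      · rintro ((h | ⟨i, hi, hy⟩) | ⟨ln', hln', h2⟩)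
        · exact Or.inl h
        · exact Or.inr ⟨ln, List.mem_cons_self, i, hi, hy⟩
        · exact Or.inr ⟨ln', List.mem_cons_of_mem _ hln', h2⟩
      · rintro (h | ⟨ln', hln', h2⟩)
        · exact Or.inl (Or.inl h)
        · rcases List.mem_cons.mp hln' with rfl | hln''
          · exact Or.inl (Or.inr h2)
          · exact Or.inr ⟨ln', hln'', h2⟩
  have main : ∀ (l : List (String × List String)) (s : PySem.Set (List String)),
      os ∈ l.foldl (fun s p =>
        (PySem.List.pyRange 0 ((p.2.length : Int)) 1).foldl (fun s ln =>
          (PySem.List.pyRange 0 ((p.2.length : Int) - ln + 1) 1).foldl (fun s i =>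
            PySem.Set.add s (PySem.List.slice p.2 (some i) (some (i + ln)))) s) s) s ↔
      os ∈ s ∨ ∃ p ∈ l, os.length < p.2.length ∧ pvFragAt p.2 os := by
    intro l
    induction l with
    | nil => intro s; simp
    | cons p l ih =>
      intro s
      simp only [List.foldl_cons]
      rw [ih, inner, pv_frag_ranges_iff]
      constructor
      · rintro ((h | h2) | ⟨q, hq, h3⟩)
        · exact Or.inl h
        · exact Or.inr ⟨p, List.mem_cons_self, h2⟩
        · exact Or.inr ⟨q, List.mem_cons_of_mem _ hq, h3⟩
      · rintro (h | ⟨q, hq, h3⟩)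
        · exact Or.inl (Or.inl h)
        · rcases List.mem_cons.mp hq with rfl | hq'
          · exact Or.inl (Or.inr h3)
          · exact Or.inr ⟨q, hq', h3⟩
  rw [main]
  unfold pvMulti
  simp [PySem.Set.empty]

-- tokens produced by str.split() contain no space character
theorem pv_go_nospace : ∀ (s cur : List Char) (acc : List (List Char)),
    (∀ c ∈ cur, PySem.Chars.isspace c = false) →
    (∀ t ∈ acc, ∀ c ∈ t, PySem.Chars.isspace c = false) →
    ∀ t ∈ PySem.Chars.split₀.go s cur acc, ∀ c ∈ t, PySem.Chars.isspace c = false := by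
  intro s
  induction s with
  | nil =>
    intro cur acc hcur hacc t ht
    simp only [PySem.Chars.split₀.go] at ht
    split at ht
    · exact hacc t (List.mem_reverse.mp ht)
    · rcases List.mem_cons.mp (List.mem_reverse.mp ht) with rfl | h
      · intro c hc; exact hcur c (List.mem_reverse.mp hc)
      · exact hacc t h
  | cons c rest ih =>
    intro cur acc hcur hacc t ht
    simp only [PySem.Chars.split₀.go] at ht
    split at ht
    · split at ht
      · exact ih [] acc (by simp) hacc t ht
      · refine ih [] (cur.reverse :: acc) (by simp) ?_ t ht
        intro u hu
        rcases List.mem_cons.mp hu with rfl | hu'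
        · intro d hd; exact hcur d (List.mem_reverse.mp hd)
        · exact hacc u hu'
    · next hsp =>
      refine ih (c :: cur) acc ?_ hacc t ht
      intro d hd
      rcases List.mem_cons.mp hd with rfl | hd'
      · exact Bool.not_eq_true (PySem.Chars.isspace d) |>.mp hsp
      · exact hcur d hd'

theorem pv_token_nospace (s t : String) (ht : t ∈ PySem.Str.split₀ s) :
    PySem.Str.isIn " " t = false := by
  simp only [PySem.Str.split₀, List.mem_map] at ht
  obtain ⟨u, hu, rfl⟩ := ht
  have hns := pv_go_nospace s.toList [] [] (by simp) (by simp) u hu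
  rw [Bool.eq_false_iff]
  intro htrue
  have hinf := (PySem.Str.isIn_iff_infix _ _).mp htrue
  have hinf : [' '] <:+: u := by simpa using hinf
  have hmem : ' ' ∈ u := (List.singleton_infix_iff ' ' u).mp hinf
  have := hns ' ' hmem
  simp [show PySem.Chars.isspace ' ' = true from by decide] at this

-- the pointwise equivalence of the two filter conditions, for x ∈ brands
theorem pv_point (brands : List String) (x : String) (hx : x ∈ brands) :
    (x ∈ pvDropA brands) ↔
      (x ∈ pvCompT brands ∨
        (PySem.Str.isIn " " x = true ∧ PySem.Str.split₀ x ∈ pvFrags brands)) := by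
  rw [pv_mem_dropA, pv_mem_compT, pv_mem_frags]
  constructor
  · rintro (⟨mw, hmw, hty, _⟩ | ⟨hxM, mw, hmw, _, hlt, hfr⟩)
    · exact Or.inl ⟨mw, hmw, hty⟩
    · exact Or.inr ⟨(List.mem_filter.mp hxM).2, mw, hmw, hlt, hfr⟩
  · rintro (⟨mw, hmw, hty⟩ | ⟨hsp, mw, hmw, hlt, hfr⟩)
    · refine Or.inl ⟨mw, hmw, hty, ?_⟩
      rw [Bool.and_eq_true, Bool.not_eq_eq_eq_not, Bool.not_true]
      exact ⟨List.contains_iff_mem.mpr hx, pv_token_nospace mw x hty⟩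
    · refine Or.inr ⟨List.mem_filter.mpr ⟨hx, hsp⟩, mw, hmw, ?_, hlt, hfr⟩
      intro heq
      rw [heq] at hlt
      omega

-- ===== VERDICT (by name: the statement is the Claim_ definition above) =====
theorem collapse_component_brands_spec : Claim_equal_collapse_component_brands := by
  intro brands _
  unfold Spec_collapse_component_brands
  rw [pv_portA_eq, pv_portB_eq]
  have hME : (pvMulti brands).isEmpty = (pvM brands).isEmpty := by
    unfold pvMulti; cases pvM brands <;> simp
  rw [hME]
  by_cases hE : (pvM brands).isEmpty
  · rw [if_pos hE, if_pos hE]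
  · rw [if_neg hE, if_neg hE]
    apply List.filter_congr
    intro x hx
    have hpt := pv_point brands x hx
    rw [← PySem.Set.contains_iff, ← PySem.Set.contains_iff, ← PySem.Set.contains_iff] at hpt
    cases hA : PySem.Set.contains (pvDropA brands) x <;>
      cases hC : PySem.Set.contains (pvCompT brands) x <;>
        cases hS : PySem.Str.isIn " " x <;>
          cases hF : PySem.Set.contains (pvFrags brands) (PySem.Str.split₀ x) <;>
            simp_all
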